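-- pv_equiv track=rewrite | github.com/georgeLochner/whedifaqaui | backend/app/services/chat.py | _match_video_title
-- ===== SOURCE A (Python) =====
-- def _match_video_title(cited_title: str, title_to_id: dict[str, str]) -> str | None:
--     """Match a cited title against known video titles.
--
--     Tries exact match first, then case-insensitive substring matching
--     to handle Claude abbreviating titles (e.g. "Meeting" for "Backdrop CMS Weekly Meeting").
--     """
--     # Exact match
--     if cited_title in title_to_id:
--         return title_to_id[cited_title]
--
--     cited_lower = cited_title.lower()
--     # Case-insensitive exact match
--     for full_title, vid in title_to_id.items():
--         if full_title.lower() == cited_lower: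
--             return vid
--
--     # Substring match: cited title is contained in a known title
--     for full_title, vid in title_to_id.items():
--         if cited_lower in full_title.lower():
--             return vid
--
--     # If only one video in results, assume the citation refers to it
--     unique_ids = list(set(title_to_id.values()))
--     if len(unique_ids) == 1:
--         return unique_ids[0]
--
--     return None
-- ===== SOURCE B (Python) =====
-- def _match_video_title(cited_title: str, title_to_id: dict[str, str]) -> str | None:
--     """Single fused pass: exact match, then one scan tracking the first
--     case-insensitive exact hit (early return) and the first substring hit,
--     then an all-values-equal singleton fallback."""
--     if cited_title in title_to_id:
--         return title_to_id[cited_title]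
--
--     cited_lower = cited_title.lower()
--     substr_hit = None
--     for full_title, vid in title_to_id.items():
--         low = full_title.lower()
--         if low == cited_lower:
--             return vid
--         if substr_hit is None and cited_lower in low:
--             substr_hit = vid
--     if substr_hit is not None:
--         return substr_hit
--
--     vals = list(title_to_id.values())
--     if vals and all(v == vals[0] for v in vals):
--         return vals[0]
--     return None
-- ===== Notes on version B (the rewrite author's own statement) =====
-- stated objective: alternative
-- what changed: Fuses A's two separate scans (case-insensitive exact, then substring) into one pass that returns early on a ci-exact hit while remembering only the first substring hit, and replaces the list(set(values)) singleton fallback by an all-values-equal check on the first value.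
import Mathlib
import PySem

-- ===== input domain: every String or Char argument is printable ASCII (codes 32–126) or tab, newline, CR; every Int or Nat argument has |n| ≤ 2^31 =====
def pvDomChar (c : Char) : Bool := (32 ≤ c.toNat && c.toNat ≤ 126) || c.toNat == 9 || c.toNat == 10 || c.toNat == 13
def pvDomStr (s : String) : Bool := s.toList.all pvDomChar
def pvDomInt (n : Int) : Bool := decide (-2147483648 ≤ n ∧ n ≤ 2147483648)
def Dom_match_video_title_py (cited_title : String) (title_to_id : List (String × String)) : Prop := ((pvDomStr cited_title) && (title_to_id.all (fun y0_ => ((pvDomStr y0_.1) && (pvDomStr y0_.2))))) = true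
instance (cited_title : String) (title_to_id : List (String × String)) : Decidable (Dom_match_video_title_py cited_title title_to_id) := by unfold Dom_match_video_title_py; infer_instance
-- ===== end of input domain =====

-- B fuses A's two scans (case-insensitive exact, then substring) into one pass with an
-- early return on ci-exact and a remembered first substring hit, and replaces the
-- list(set(values)) singleton fallback by an all-values-equal check (alternative, not faster).


-- ===== PORT A =====
def match_video_title_py (cited_title : String) (title_to_id : List (String × String)) : Option String :=
  match (PySem.Dict.mk title_to_id).get? cited_title with
  | some v => some v
  | none =>
    let citedLower := PySem.Str.lower cited_title
    match title_to_id.find? (fun p => PySem.Str.lower p.1 == citedLower) with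
    | some p => some p.2
    | none =>
      match title_to_id.find? (fun p => PySem.Str.isIn citedLower (PySem.Str.lower p.1)) with
      | some p => some p.2
      | none =>
        let uniqueIds : PySem.Set String := PySem.Set.ofList (title_to_id.map Prod.snd)
        if uniqueIds.length = 1 then PySem.List.pyGet? uniqueIds 0 else none

-- ===== PORT B =====
-- Source B's fused loop: early return on ci-exact, remember the first substring hit.
def mvAltScan (citedLower : String) : List (String × String) → Option String → Option String
  | [], substrHit => substrHit
  | (t, vid) :: rest, substrHit =>
    let low := PySem.Str.lower t
    if low == citedLower then some vid
    else mvAltScan citedLower rest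
      (if substrHit.isNone && PySem.Str.isIn citedLower low then some vid else substrHit)

def match_video_title_py_alt (cited_title : String) (title_to_id : List (String × String)) : Option String :=
  match (PySem.Dict.mk title_to_id).get? cited_title with
  | some v => some v
  | none =>
    match mvAltScan (PySem.Str.lower cited_title) title_to_id none with
    | some v => some v
    | none =>
      let vals := title_to_id.map Prod.snd
      match vals.head? with
      | none => none
      | some v0 => if vals.all (fun x => x == v0) then some v0 else none

-- ===== PRECONDITION & SPEC =====
def Spec_match_video_title_py (cited_title : String) (title_to_id : List (String × String)) (out : Option String) : Prop := out = match_video_title_py_alt cited_title title_to_id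
instance (cited_title : String) (title_to_id : List (String × String)) (out : Option String) : Decidable (Spec_match_video_title_py cited_title title_to_id out) := by unfold Spec_match_video_title_py; infer_instance

-- ===== CLAIM (what is proved, stated in full; the proofs are below) =====
def Claim_equal_match_video_title_py : Prop := ∀ (cited_title : String) (title_to_id : List (String × String)), Dom_match_video_title_py cited_title title_to_id → Spec_match_video_title_py cited_title title_to_id (match_video_title_py cited_title title_to_id)

-- ===== LEMMAS AND PROOFS =====

-- the fused scan equals: first ci-exact hit, else the accumulator, else the first substring hit
theorem mvAltScan_eq (citedLower : String) (l : List (String × String)) (acc : Option String) :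
    mvAltScan citedLower l acc =
      match l.find? (fun p => PySem.Str.lower p.1 == citedLower) with
      | some p => some p.2
      | none => acc.or ((l.find? (fun p => PySem.Str.isIn citedLower (PySem.Str.lower p.1))).map Prod.snd) := by
  induction l generalizing acc with
  | nil => cases acc <;> simp [mvAltScan]
  | cons hd tl ih =>
    obtain ⟨t, vid⟩ := hd
    by_cases hx : PySem.Str.lower t == citedLower
    · simp [mvAltScan, List.find?, hx]
    · have hx' : (PySem.Str.lower t == citedLower) = false := by simpa using hx
      simp only [mvAltScan, hx', List.find?]
      rw [ih]
      cases hfe : List.find? (fun p => PySem.Str.lower p.1 == citedLower) tl with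
      | some p => simp
      | none =>
        cases acc with
        | some a => simp
        | none =>
          by_cases hs : PySem.Chars.isIn citedLower.toList (PySem.Chars.lower t.toList)
          · simp [hs]
          · have hs' : PySem.Chars.isIn citedLower.toList (PySem.Chars.lower t.toList) = false := by
              simpa using hs
            simp [hs']

-- the singleton-set fallback equals the all-equal-to-head fallback
theorem mvFallback_eq (vals : List String) :
    (if (PySem.Set.ofList vals).length = 1 then PySem.List.pyGet? (PySem.Set.ofList vals) 0 else none) =
      (match vals.head? with
       | none => none
       | some v0 => if vals.all (fun x => x == v0) then some v0 else none) := by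
  cases vals with
  | nil => simp [PySem.Set.ofList, PySem.Set.empty]
  | cons v0 rest =>
    simp only [List.head?]
    by_cases hall : (v0 :: rest).all (fun x => x == v0)
    · have h1 : PySem.Set.ofList (v0 :: rest) = [v0] := by
        have : ∀ (l : List String), l.all (fun x => x == v0) → ∀ s : PySem.Set String,
            s = [v0] → l.foldl PySem.Set.add s = [v0] := by
          intro l
          induction l with
          | nil => intro _ s hs; simpa using hs
          | cons a tl ih =>
            intro hal s hs
            simp only [List.all_cons, Bool.and_eq_true, beq_iff_eq] at hal
            simp only [List.foldl_cons]
            exact ih hal.2 _ (by simp [hs, PySem.Set.add, PySem.Set.contains, hal.1])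
        have h0 : PySem.Set.ofList (v0 :: rest) = rest.foldl PySem.Set.add [v0] := by
          simp [PySem.Set.ofList_eq_foldl, PySem.Set.add, PySem.Set.contains]
        rw [h0]
        exact this rest (by simp only [List.all_cons, Bool.and_eq_true] at hall; exact hall.2) _ rfl
      simp [h1, hall, PySem.List.pyGet?, PySem.List.pyIdx?]
    · have hne : (PySem.Set.ofList (v0 :: rest)).length ≠ 1 := by
        intro hlen
        apply hall
        have hmem0 : v0 ∈ PySem.Set.ofList (v0 :: rest) := by
          rw [PySem.Set.mem_ofList]; simp
        obtain ⟨u, hu⟩ : ∃ u, PySem.Set.ofList (v0 :: rest) = [u] := by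
          cases hS : PySem.Set.ofList (v0 :: rest) with
          | nil => rw [hS] at hlen; simp at hlen
          | cons a tl =>
            rw [hS] at hlen
            simp at hlen
            exact ⟨a, by simp [hlen]⟩
        have hv0 : u = v0 := by
          rw [hu] at hmem0
          exact (by simpa using hmem0 : v0 = u).symm
        simp only [List.all_eq_true, beq_iff_eq]
        intro x hx
        have : x ∈ PySem.Set.ofList (v0 :: rest) := by rw [PySem.Set.mem_ofList]; exact hx
        rw [hu, hv0] at this
        simpa using this
      simp [hne, hall]

-- ===== VERDICT (by name: the statement is the Claim_ definition above) =====
theorem match_video_title_py_spec : Claim_equal_match_video_title_py := by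
  intro cited_title title_to_id _
  unfold Spec_match_video_title_py match_video_title_py match_video_title_py_alt
  cases (PySem.Dict.mk title_to_id).get? cited_title with
  | some v => rfl
  | none =>
    simp only
    rw [mvAltScan_eq]
    cases List.find? (fun p => PySem.Str.lower p.1 == PySem.Str.lower cited_title) title_to_id with
    | some p => rfl
    | none =>
      cases List.find? (fun p => PySem.Str.isIn (PySem.Str.lower cited_title) (PySem.Str.lower p.1)) title_to_id with
      | some p => simp
      | none => simpa using mvFallback_eq (title_to_id.map Prod.snd)
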